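-- pv_equiv track=rewrite | github.com/talkops-ai/k8s-autopilot | k8s_autopilot/core/agents/helm_generator/template/template_coordinator.py | identify_tool_dependencies
-- ===== SOURCE A (Python) =====
-- from typing import Dict, Any, Optional, List, Literal
--
-- def identify_tool_dependencies(conditional_tools: List[str], core_tools: List[str]) -> Dict[str, List[str]]:
--     """
--     Identify which tools depend on which other tools.
--
--     Args:
--         conditional_tools: List of conditional tools to execute
--         core_tools: List of core tools (always executed)
--
--     Returns:
--         Dict mapping tool_name -> list of dependency tool names
--     """
--     dependencies = {}
--
--     # HPA requires Deployment
--     if "generate_hpa_yaml" in conditional_tools: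
--         dependencies["generate_hpa_yaml"] = ["generate_deployment_yaml"]
--
--     # PDB requires Deployment
--     if "generate_pdb_yaml" in conditional_tools:
--         dependencies["generate_pdb_yaml"] = ["generate_deployment_yaml"]
--
--     # NetworkPolicy requires Deployment
--     if "generate_network_policy_yaml" in conditional_tools:
--         dependencies["generate_network_policy_yaml"] = ["generate_deployment_yaml"]
--
--     # Ingress/Traefik require Service AND helpers (for template functions)
--     ingress_tools = ["generate_traefik_ingressroute_yaml"]
--     for tool in ingress_tools:
--         if tool in conditional_tools:
--             dependencies[tool] = ["generate_service_yaml", "generate_helpers_tpl"]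
--
--     # ConfigMap and Secret can run independently (no hard dependencies)
--     # ServiceAccount/RBAC can run independently
--
--     # values.yaml should run after all templates (core + conditional) but before README
--     # It depends on all templates to consolidate all configuration values
--     all_template_tools = core_tools + conditional_tools
--     dependencies["generate_values_yaml"] = all_template_tools
--
--     # README requires ALL generated templates (core + conditional) AND values.yaml
--     # This ensures README is generated last with complete information including values
--     dependencies["generate_readme"] = all_template_tools + ["generate_values_yaml"]
--
--     return dependencies
-- ===== SOURCE B (Python) =====
-- from typing import Dict, List
--
-- # Canonical emission order of the conditional entries and their dependency lists.
-- _ORDER = [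
--     ("generate_hpa_yaml", ["generate_deployment_yaml"]),
--     ("generate_pdb_yaml", ["generate_deployment_yaml"]),
--     ("generate_network_policy_yaml", ["generate_deployment_yaml"]),
--     ("generate_traefik_ingressroute_yaml", ["generate_service_yaml", "generate_helpers_tpl"]),
-- ]
-- _RANK = {name: i for i, (name, _) in enumerate(_ORDER)}
--
-- def identify_tool_dependencies(conditional_tools: List[str], core_tools: List[str]) -> Dict[str, List[str]]:
--     # One pass over the INPUT: record which known conditional tools occur, as a bitmask.
--     mask = 0
--     for t in conditional_tools:
--         i = _RANK.get(t)
--         if i is not None: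
--             mask |= 1 << i
--     # Emit the present entries in canonical order from the mask.
--     dependencies = {}
--     for i, (name, deps) in enumerate(_ORDER):
--         if (mask >> i) & 1:
--             dependencies[name] = list(deps)
--     all_template_tools = core_tools + conditional_tools
--     dependencies["generate_values_yaml"] = all_template_tools
--     dependencies["generate_readme"] = all_template_tools + ["generate_values_yaml"]
--     return dependencies
-- ===== Notes on version B (the rewrite author's own statement) =====
-- stated objective: alternative
-- what changed: Inverts the data flow: instead of scanning conditional_tools once per known tool (four membership tests), B makes a single pass over conditional_tools accumulating a presence bitmask via a rank dict, then emits the present entries from the mask in canonical order.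
import Mathlib
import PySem

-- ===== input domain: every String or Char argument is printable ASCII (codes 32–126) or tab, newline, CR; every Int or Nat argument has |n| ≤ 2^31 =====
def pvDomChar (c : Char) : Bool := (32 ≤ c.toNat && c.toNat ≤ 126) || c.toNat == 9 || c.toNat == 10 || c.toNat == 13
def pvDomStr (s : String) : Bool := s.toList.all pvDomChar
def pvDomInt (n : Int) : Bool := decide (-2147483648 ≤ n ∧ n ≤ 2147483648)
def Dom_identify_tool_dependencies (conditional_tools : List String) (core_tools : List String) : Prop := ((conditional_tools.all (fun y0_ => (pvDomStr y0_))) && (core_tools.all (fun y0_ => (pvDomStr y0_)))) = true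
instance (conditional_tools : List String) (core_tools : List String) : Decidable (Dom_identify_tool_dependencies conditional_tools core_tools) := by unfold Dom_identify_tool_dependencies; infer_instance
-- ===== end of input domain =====

-- B inverts the data flow: one pass over conditional_tools building a presence bitmask, then emits entries from the mask in canonical order (instead of A's four membership scans); objective: alternative.
-- ===== PORT A =====
def identify_tool_dependencies (conditional_tools : List String) (core_tools : List String) : List (String × List String) :=
  let d : PySem.Dict String (List String) := PySem.Dict.empty
  let d := if conditional_tools.contains "generate_hpa_yaml" then
             d.insert "generate_hpa_yaml" ["generate_deployment_yaml"] else d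
  let d := if conditional_tools.contains "generate_pdb_yaml" then
             d.insert "generate_pdb_yaml" ["generate_deployment_yaml"] else d
  let d := if conditional_tools.contains "generate_network_policy_yaml" then
             d.insert "generate_network_policy_yaml" ["generate_deployment_yaml"] else d
  let ingress_tools : List String := ["generate_traefik_ingressroute_yaml"]
  let d := ingress_tools.foldl (fun d tool =>
             if conditional_tools.contains tool then
               d.insert tool ["generate_service_yaml", "generate_helpers_tpl"] else d) d
  let all_template_tools := core_tools ++ conditional_tools
  let d := d.insert "generate_values_yaml" all_template_tools
  let d := d.insert "generate_readme" (all_template_tools ++ ["generate_values_yaml"])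
  d.items

-- ===== PORT B =====
-- canonical order table (_ORDER in Source B)
def pvOrder : List (String × List String) :=
  [("generate_hpa_yaml", ["generate_deployment_yaml"]),
   ("generate_pdb_yaml", ["generate_deployment_yaml"]),
   ("generate_network_policy_yaml", ["generate_deployment_yaml"]),
   ("generate_traefik_ingressroute_yaml", ["generate_service_yaml", "generate_helpers_tpl"])]

-- _RANK.get(t) in Source B
def pvRank (t : String) : Option Nat :=
  if t = "generate_hpa_yaml" then some 0
  else if t = "generate_pdb_yaml" then some 1
  else if t = "generate_network_policy_yaml" then some 2
  else if t = "generate_traefik_ingressroute_yaml" then some 3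
  else none

-- mask |= 1 << i  (1 <<< i = 2 ^ i)
def pvStep (m : Nat) (t : String) : Nat :=
  match pvRank t with
  | some i => m ||| (1 <<< i)
  | none => m

def identify_tool_dependencies_alt (conditional_tools : List String) (core_tools : List String) : List (String × List String) :=
  let mask := conditional_tools.foldl pvStep 0
  -- for i,(name,deps) in enumerate(_ORDER): if (mask >> i) & 1: ...   ((mask >>> i) &&& 1 = 1 ↔ testBit)
  let d : PySem.Dict String (List String) :=
    (pvOrder.zipIdx).foldl (fun d p =>
      if mask.testBit p.2 then d.insert p.1.1 p.1.2 else d) PySem.Dict.empty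
  let all_template_tools := core_tools ++ conditional_tools
  ((d.insert "generate_values_yaml" all_template_tools).insert
     "generate_readme" (all_template_tools ++ ["generate_values_yaml"])).items

-- ===== PRECONDITION & SPEC =====
def Spec_identify_tool_dependencies (conditional_tools : List String) (core_tools : List String) (out : List (String × List String)) : Prop := out = identify_tool_dependencies_alt conditional_tools core_tools
instance (conditional_tools : List String) (core_tools : List String) (out : List (String × List String)) : Decidable (Spec_identify_tool_dependencies conditional_tools core_tools out) := by unfold Spec_identify_tool_dependencies; infer_instance

-- ===== CLAIM (what is proved, stated in full; the proofs are below) =====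
def Claim_equal_identify_tool_dependencies : Prop := ∀ (conditional_tools : List String) (core_tools : List String), Dom_identify_tool_dependencies conditional_tools core_tools → Spec_identify_tool_dependencies conditional_tools core_tools (identify_tool_dependencies conditional_tools core_tools)

-- ===== LEMMAS AND PROOFS =====
theorem pvStep_testBit (m : Nat) (t : String) (i : Nat) :
    (pvStep m t).testBit i = (m.testBit i || (pvRank t == some i)) := by
  unfold pvStep
  cases h : pvRank t with
  | none => simp
  | some j =>
      simp only [Nat.testBit_or, Nat.shiftLeft_eq]
      by_cases hv : j = i <;> simp [hv]

theorem mask_testBit (ct : List String) (m : Nat) (i : Nat) :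
    (ct.foldl pvStep m).testBit i = (m.testBit i || ct.any (fun t => pvRank t == some i)) := by
  induction ct generalizing m with
  | nil => simp
  | cons hd tl ih =>
      simp [List.foldl_cons, ih, pvStep_testBit, Bool.or_assoc]

theorem rank_eq (t : String) (i : Nat) (hi : i < 4) :
    (pvRank t == some i) = (t == (pvOrder[i]'(by simpa [pvOrder] using hi)).1) := by
  interval_cases i <;>
    (unfold pvRank; split_ifs with h1 h2 h3 h4 <;> simp_all [pvOrder])

theorem mask_bit (ct : List String) (i : Nat) (hi : i < 4) :
    (ct.foldl pvStep 0).testBit i = ct.contains (pvOrder[i]'(by simpa [pvOrder] using hi)).1 := by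
  rw [mask_testBit]
  simp only [Nat.zero_testBit, Bool.false_or, List.contains_eq_any_beq]
  have hfun : (fun t => pvRank t == some i) = (fun t => t == (pvOrder[i]'(by simpa [pvOrder] using hi)).1) :=
    funext (fun t => rank_eq t i hi)
  rw [hfun]
  simp [BEq.comm]

-- ===== VERDICT (by name: the statement is the Claim_ definition above) =====
theorem identify_tool_dependencies_spec : Claim_equal_identify_tool_dependencies := by
  intro ct core _
  unfold Spec_identify_tool_dependencies
  have h0 := mask_bit ct 0 (by norm_num)
  have h1 := mask_bit ct 1 (by norm_num)
  have h2 := mask_bit ct 2 (by norm_num)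
  have h3 := mask_bit ct 3 (by norm_num)
  simp only [pvOrder, List.getElem_cons_zero, List.getElem_cons_succ] at h0 h1 h2 h3
  unfold identify_tool_dependencies identify_tool_dependencies_alt
  simp only [pvOrder, List.zipIdx, List.foldl_cons, List.foldl_nil, h0, h1, h2, h3]
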